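-- pv_equiv track=rewrite | github.com/tcardella/AdventOfCode | 2024/test_2024_07.py | get_valid_calibrations
-- ===== SOURCE A (Python) =====
-- def evaluate_left_to_right(numbers, operators):
--     value = numbers[0]
--     for num, op in zip(numbers[1:], operators):
--         if op == '*':
--             value *= num
--         elif op == '+':
--             value += num
--         elif op == '||':
--             value = int(str(value) + str(num))
--
--     return value
--
-- def generate_operator_combinations(numbers, current_ops, all_ops, valid_ops):
--     if len(current_ops) == len(numbers) - 1:
--         all_ops.append(current_ops.copy())
--         return
--
--     for op in valid_ops:
--         current_ops.append(op)
--         generate_operator_combinations(numbers, current_ops, all_ops, valid_ops)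
--         current_ops.pop()
--
-- def get_valid_calibrations(calibrations, valid_ops):
--     valid_results = []
--
--     for result, numbers in calibrations:
--         all_operator_combinations = []
--         generate_operator_combinations(numbers, [], all_operator_combinations, valid_ops)
--
--         for ops in all_operator_combinations:
--             if evaluate_left_to_right(numbers, ops) == result:
--                 valid_results.append(result)
--                 break
--
--     return sum(valid_results)
-- ===== SOURCE B (Python) =====
-- def _apply(v, num, op):
--     if op == '*':
--         return v * num
--     if op == '+':
--         return v + num
--     if op == '||':
--         return int(str(v) + str(num))
--     return v
--
--
-- def get_valid_calibrations(calibrations, valid_ops):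
--     ops = set(valid_ops)
--     total = 0
--     for result, numbers in calibrations:
--         values = {numbers[0]}
--         for num in numbers[1:]:
--             values = {_apply(v, num, op) for v in values for op in ops}
--         if result in values:
--             total += result
--     return total
-- ===== Notes on version B (the rewrite author's own statement) =====
-- stated objective: faster
-- what changed: A materialises every operator sequence (k^(n-1) lists) and re-evaluates each from scratch; B makes one left-to-right pass per line maintaining the deduplicated set of reachable values, so the explicit enumeration of operator sequences disappears.
-- outside the precondition, e.g. on get_valid_calibrations([(5, [])], []): A returns 0, B raises IndexError; on get_valid_calibrations([(-6, [2, 3, -1])], ['*', '||']): A returns -6, B raises ValueError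
import Mathlib
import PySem

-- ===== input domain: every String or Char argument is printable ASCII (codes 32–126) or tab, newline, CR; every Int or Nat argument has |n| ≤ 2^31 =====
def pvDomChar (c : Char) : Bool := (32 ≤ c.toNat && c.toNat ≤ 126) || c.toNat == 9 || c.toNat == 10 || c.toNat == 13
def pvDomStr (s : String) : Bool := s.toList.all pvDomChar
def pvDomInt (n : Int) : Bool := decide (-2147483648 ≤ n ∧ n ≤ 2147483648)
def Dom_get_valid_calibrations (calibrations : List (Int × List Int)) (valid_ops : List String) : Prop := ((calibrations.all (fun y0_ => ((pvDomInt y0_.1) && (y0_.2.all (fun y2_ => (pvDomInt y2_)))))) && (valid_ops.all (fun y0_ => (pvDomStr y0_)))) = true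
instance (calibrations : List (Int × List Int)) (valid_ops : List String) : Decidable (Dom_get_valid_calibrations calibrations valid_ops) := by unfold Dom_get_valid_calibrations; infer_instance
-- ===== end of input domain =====

-- B replaces A's explicit enumeration of all operator sequences by one pass per line over the
-- deduplicated set of reachable values; equivalence of the two ports is proved on Pre_ below.

-- ===== PORT A =====
-- int(str(v) + str(num)), exact via PySem: Python raises ValueError exactly where ofChars? is
-- none (num < 0); Pre_ excludes those inputs, so the .getD 0 default is never the value used.
def pyConcat (v num : Int) : Int :=
  (PySem.Int.ofChars? (PySem.Int.toChars v ++ PySem.Int.toChars num)).getD 0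

-- evaluate_left_to_right; numbers[0] on an empty list raises IndexError (excluded by Pre_)
def evalLTR (numbers : List Int) (operators : List String) : Int :=
  (List.zip (numbers.drop 1) operators).foldl
    (fun value p =>
      if p.2 = "*" then value * p.1
      else if p.2 = "+" then value + p.1
      else if p.2 = "||" then pyConcat value p.1
      else value)
    ((PySem.List.pyGet? numbers 0).getD 0)

-- generate_operator_combinations; the fuel only makes Lean's recursion total: Python's
-- recursion diverges when current.length can never reach len(numbers)-1 (excluded by Pre_)
def genAux (fuel : Nat) (numbers : List Int) (current : List String)
    (all : List (List String)) (valid_ops : List String) : List (List String) :=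
  if (current.length : Int) = (numbers.length : Int) - 1 then all ++ [current]
  else match fuel with
    | 0 => all
    | f+1 => valid_ops.foldl (fun acc op => genAux f numbers (current ++ [op]) acc valid_ops) all

-- the inner 'for ops in all_operator_combinations: … break' loop
def findLoop (numbers : List Int) (result : Int) (combos : List (List String))
    (acc : List Int) : List Int :=
  match combos with
  | [] => acc
  | ops :: rest =>
      if evalLTR numbers ops = result then acc ++ [result] else findLoop numbers result rest acc

def get_valid_calibrations (calibrations : List (Int × List Int)) (valid_ops : List String) : Int :=
  (calibrations.foldl
    (fun valid_results c =>
      findLoop c.2 c.1 (genAux c.2.length c.2 [] [] valid_ops) valid_results)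
    []).foldl (· + ·) 0

-- ===== PORT B =====
def applyOp (v num : Int) (op : String) : Int :=
  if op = "*" then v * num
  else if op = "+" then v + num
  else if op = "||" then pyConcat v num
  else v

def get_valid_calibrations_alt (calibrations : List (Int × List Int)) (valid_ops : List String) : Int :=
  let ops : PySem.Set String := PySem.Set.ofList valid_ops
  calibrations.foldl
    (fun total c =>
      let values : PySem.Set Int :=
        (c.2.drop 1).foldl
          (fun vals num =>
            vals.foldl
              (fun s v => ops.foldl (fun s2 op => PySem.Set.add s2 (applyOp v num op)) s)
              PySem.Set.empty)
          (PySem.Set.ofList [(PySem.List.pyGet? c.2 0).getD 0])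
      if PySem.Set.contains values c.1 then total + c.1 else total)
    0

-- ===== PRECONDITION & SPEC =====
-- Pre_ excludes (i) calibrations with an empty number list (numbers[0] raises IndexError, or the
-- combination generator recurses forever; with valid_ops == [] A happens to return, but B's own
-- numbers[0] raises there too) and (ii), when '||' is a valid op, negative operands after the
-- first (int(str(v) + str(num)) raises ValueError on some combination; whether A reaches it
-- before its break depends on the accidental enumeration order, and B raises there).
def Pre_get_valid_calibrations (calibrations : List (Int × List Int)) (valid_ops : List String) : Prop :=
  ∀ c ∈ calibrations, c.2 ≠ [] ∧ ("||" ∈ valid_ops → ∀ n ∈ c.2.drop 1, 0 ≤ n)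
instance (calibrations : List (Int × List Int)) (valid_ops : List String) : Decidable (Pre_get_valid_calibrations calibrations valid_ops) := by unfold Pre_get_valid_calibrations; infer_instance

def pvWitness_get_valid_calibrations : (List (Int × List Int)) × List String :=
  ([(190, [10, 19]), (83, [17, 5])], ["*", "+"])

def Spec_get_valid_calibrations (calibrations : List (Int × List Int)) (valid_ops : List String) (out : Int) : Prop := out = get_valid_calibrations_alt calibrations valid_ops
instance (calibrations : List (Int × List Int)) (valid_ops : List String) (out : Int) : Decidable (Spec_get_valid_calibrations calibrations valid_ops out) := by unfold Spec_get_valid_calibrations; infer_instance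

-- ===== CLAIM (what is proved, stated in full; the proofs are below) =====
def Claim_equal_get_valid_calibrations : Prop := ∀ (calibrations : List (Int × List Int)) (valid_ops : List String), Dom_get_valid_calibrations calibrations valid_ops → Pre_get_valid_calibrations calibrations valid_ops → Spec_get_valid_calibrations calibrations valid_ops (get_valid_calibrations calibrations valid_ops)

-- ===== LEMMAS AND PROOFS =====

-- all operator sequences of length k over valid_ops, in A's enumeration order
def seqs (valid_ops : List String) : Nat → List (List String)
  | 0 => [[]]
  | k+1 => valid_ops.flatMap (fun op => (seqs valid_ops k).map (op :: ·))

-- common evaluation shape of both ports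
def foldApply (v0 : Int) (nums : List Int) (opsl : List String) : Int :=
  (nums.zip opsl).foldl (fun v p => applyOp v p.1 p.2) v0

theorem evalLTR_eq (numbers : List Int) (opsl : List String) :
    evalLTR numbers opsl = foldApply ((PySem.List.pyGet? numbers 0).getD 0) (numbers.drop 1) opsl := rfl

theorem mem_seqs (valid_ops : List String) :
    ∀ (k : Nat) (opsl : List String),
      opsl ∈ seqs valid_ops k ↔ opsl.length = k ∧ ∀ o ∈ opsl, o ∈ valid_ops := by
  intro k
  induction k with
  | zero =>
    intro opsl
    constructor
    · intro h
      have : opsl = [] := by simpa [seqs] using h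
      subst this; simp
    · rintro ⟨h, _⟩
      simp [seqs, List.length_eq_zero_iff.1 h]
  | succ k ih =>
    intro opsl
    cases opsl with
    | nil => simp [seqs]
    | cons o t =>
      simp only [seqs, List.mem_flatMap, List.mem_map]
      constructor
      · rintro ⟨op, hop, s, hs, heq⟩
        obtain ⟨h1, h2⟩ := (ih s).1 hs
        cases heq
        refine ⟨by simp [h1], ?_⟩
        intro x hx
        rcases List.mem_cons.1 hx with h | h
        · exact h ▸ hop
        · exact h2 x h
      · rintro ⟨hlen, hmem⟩
        refine ⟨o, hmem o (by simp), t, (ih t).2 ⟨by simpa using hlen, fun x hx => hmem x (by simp [hx])⟩, rfl⟩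

theorem genAux_eq (valid_ops : List String) :
    ∀ (fuel : Nat) (numbers : List Int) (current : List String) (all : List (List String)),
      current.length + 1 ≤ numbers.length →
      numbers.length - 1 - current.length ≤ fuel →
      genAux fuel numbers current all valid_ops
        = all ++ (seqs valid_ops (numbers.length - 1 - current.length)).map (current ++ ·) := by
  intro fuel
  induction fuel with
  | zero =>
    intro numbers current all h1 h2
    have hk : numbers.length - 1 - current.length = 0 := Nat.le_zero.1 h2
    have hc : (current.length : Int) = (numbers.length : Int) - 1 := by omega
    simp [genAux, hc, hk, seqs]
  | succ f ih =>
    intro numbers current all h1 h2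
    by_cases hc : (current.length : Int) = (numbers.length : Int) - 1
    · have hk : numbers.length - 1 - current.length = 0 := by omega
      simp [genAux, hc, hk, seqs]
    · have hlt : current.length + 1 ≤ numbers.length - 1 := by omega
      have hk : numbers.length - 1 - current.length
          = (numbers.length - 1 - (current.length + 1)) + 1 := by omega
      rw [genAux]
      simp only [hc, if_false]
      have hstep : ∀ (acc : List (List String)) (op : String), op ∈ valid_ops →
          genAux f numbers (current ++ [op]) acc valid_ops
            = acc ++ (seqs valid_ops (numbers.length - 1 - (current.length + 1))).map
                ((current ++ [op]) ++ ·) := by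
        intro acc op _
        have := ih numbers (current ++ [op]) acc (by simpa using by omega)
          (by simp; omega)
        simpa using this
      rw [PySem.List.foldl_congr_mem valid_ops _
        (fun acc op => acc ++ (seqs valid_ops (numbers.length - 1 - (current.length + 1))).map
          ((current ++ [op]) ++ ·)) all
        (fun acc op hop => hstep acc op hop)]
      rw [PySem.List.foldl_append_eq_flatMap]
      rw [hk]
      simp only [seqs, List.flatMap_def, List.map_flatten, List.map_map]
      congr 1
      congr 1
      apply List.map_congr_left
      intro op _
      simp [Function.comp, List.append_assoc]

theorem findLoop_eq (numbers : List Int) (result : Int) :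
    ∀ (combos : List (List String)) (acc : List Int),
      findLoop numbers result combos acc
        = if ∃ o ∈ combos, evalLTR numbers o = result then acc ++ [result] else acc := by
  intro combos
  induction combos with
  | nil => intro acc; simp [findLoop]
  | cons ops rest ih =>
    intro acc
    rw [findLoop]
    by_cases h : evalLTR numbers ops = result
    · simp [h]
    · rw [if_neg h, ih]
      by_cases hex : ∃ o ∈ rest, evalLTR numbers o = result
      · rw [if_pos hex, if_pos (by rcases hex with ⟨o, ho, he⟩; exact ⟨o, by simp [ho], he⟩)]
      · have hno : ¬ ∃ o ∈ ops :: rest, evalLTR numbers o = result := by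
          rintro ⟨o, ho, he⟩
          rcases List.mem_cons.1 ho with h' | h'
          · exact h (h' ▸ he)
          · exact hex ⟨o, h', he⟩
        rw [if_neg hex, if_neg hno]

theorem mem_foldl_add (opsL : List String) (f : String → Int) :
    ∀ (s : PySem.Set Int) (t : Int),
      t ∈ opsL.foldl (fun s2 op => PySem.Set.add s2 (f op)) s ↔ t ∈ s ∨ ∃ op ∈ opsL, t = f op := by
  induction opsL with
  | nil => intro s t; simp
  | cons o rest ih =>
    intro s t
    rw [List.foldl_cons, ih]
    rw [PySem.Set.mem_add]
    constructor
    · rintro (⟨h | h⟩ | ⟨op, hop, he⟩)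
      · exact Or.inl h
      · exact Or.inr ⟨o, by simp, h⟩
      · exact Or.inr ⟨op, by simp [hop], he⟩
    · rintro (h | ⟨op, hop, he⟩)
      · exact Or.inl (Or.inl h)
      · rcases List.mem_cons.1 hop with h' | h'
        · exact Or.inl (Or.inr (h' ▸ he))
        · exact Or.inr ⟨op, h', he⟩

theorem mem_vals_fold (opsL : List String) (num : Int) :
    ∀ (vals : List Int) (s : PySem.Set Int) (t : Int),
      t ∈ vals.foldl
            (fun s v => (PySem.Set.ofList opsL).foldl
              (fun s2 op => PySem.Set.add s2 (applyOp v num op)) s) s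
        ↔ t ∈ s ∨ ∃ v ∈ vals, ∃ op ∈ opsL, t = applyOp v num op := by
  intro vals
  induction vals with
  | nil => intro s t; simp
  | cons v rest ih =>
    intro s t
    rw [List.foldl_cons, ih, mem_foldl_add]
    constructor
    · rintro (⟨h | ⟨op, hop, he⟩⟩ | ⟨w, hw, op, hop, he⟩)
      · exact Or.inl h
      · exact Or.inr ⟨v, by simp, op, (PySem.Set.mem_ofList opsL op).1 hop, he⟩
      · exact Or.inr ⟨w, by simp [hw], op, hop, he⟩
    · rintro (h | ⟨w, hw, op, hop, he⟩)
      · exact Or.inl (Or.inl h)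
      · rcases List.mem_cons.1 hw with h' | h'
        · exact Or.inl (Or.inr ⟨op, (PySem.Set.mem_ofList opsL op).2 hop, h' ▸ he⟩)
        · exact Or.inr ⟨w, h', op, hop, he⟩

theorem mem_chain (opsL : List String) :
    ∀ (nums : List Int) (vals0 : PySem.Set Int) (t : Int),
      t ∈ nums.foldl
            (fun vals num =>
              vals.foldl
                (fun s v => (PySem.Set.ofList opsL).foldl
                  (fun s2 op => PySem.Set.add s2 (applyOp v num op)) s)
                PySem.Set.empty)
            vals0
        ↔ ∃ v ∈ vals0, ∃ opsl : List String,
            opsl.length = nums.length ∧ (∀ o ∈ opsl, o ∈ opsL) ∧ foldApply v nums opsl = t := by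
  intro nums
  induction nums with
  | nil =>
    intro vals0 t
    simp only [List.foldl_nil]
    constructor
    · intro h
      exact ⟨t, h, [], rfl, by simp, rfl⟩
    · rintro ⟨v, hv, opsl, hlen, _, he⟩
      have : opsl = [] := List.length_eq_zero_iff.1 hlen
      subst this
      simpa [foldApply] using he ▸ hv
  | cons num rest ih =>
    intro vals0 t
    rw [List.foldl_cons, ih]
    constructor
    · rintro ⟨w, hw, opsl, hlen, hsub, he⟩
      rcases (mem_vals_fold opsL num vals0 PySem.Set.empty w).1 hw with h | ⟨v, hv, op, hop, hw'⟩
      · simp [PySem.Set.empty] at h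
      · refine ⟨v, hv, op :: opsl, by simp [hlen], ?_, ?_⟩
        · intro o ho
          rcases List.mem_cons.1 ho with h' | h'
          · exact h' ▸ hop
          · exact hsub o h'
        · simpa [foldApply, ← hw'] using he
    · rintro ⟨v, hv, opsl, hlen, hsub, he⟩
      cases opsl with
      | nil => simp at hlen
      | cons op t' =>
        refine ⟨applyOp v num op,
          (mem_vals_fold opsL num vals0 PySem.Set.empty (applyOp v num op)).2
            (Or.inr ⟨v, hv, op, hsub op (by simp), rfl⟩),
          t', by simpa using hlen, fun o ho => hsub o (by simp [ho]), ?_⟩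
        simpa [foldApply] using he

-- per-calibration: A's "some generated combination evaluates to result" is B's set membership
theorem calib_iff (valid_ops : List String) (result : Int) (numbers : List Int)
    (h : numbers ≠ []) :
    (∃ o ∈ genAux numbers.length numbers [] [] valid_ops, evalLTR numbers o = result)
      ↔ result ∈ (numbers.drop 1).foldl
          (fun vals num =>
            vals.foldl
              (fun s v => (PySem.Set.ofList valid_ops).foldl
                (fun s2 op => PySem.Set.add s2 (applyOp v num op)) s)
              PySem.Set.empty)
          (PySem.Set.ofList [(PySem.List.pyGet? numbers 0).getD 0]) := by
  have hn : 1 ≤ numbers.length := by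
    cases numbers with
    | nil => simp at h
    | cons a l => simp
  rw [genAux_eq valid_ops numbers.length numbers [] [] (by simpa using hn) (by omega)]
  rw [mem_chain]
  simp only [List.nil_append, List.mem_map]
  constructor
  · rintro ⟨o, ⟨s, hs, rfl⟩, he⟩
    obtain ⟨hlen, hsub⟩ := (mem_seqs valid_ops _ s).1 hs
    refine ⟨(PySem.List.pyGet? numbers 0).getD 0, by simp [PySem.Set.ofList],
      [] ++ s, ?_, by simpa using hsub, ?_⟩
    · simp [hlen]
    · rw [← evalLTR_eq]; simpa using he
  · rintro ⟨v, hv, opsl, hlen, hsub, he⟩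
    have hv' : v = (PySem.List.pyGet? numbers 0).getD 0 := by
      simpa [PySem.Set.ofList] using hv
    refine ⟨opsl, ⟨opsl, (mem_seqs valid_ops _ opsl).2 ⟨?_, hsub⟩, by simp⟩, ?_⟩
    · simpa using hlen
    · rw [evalLTR_eq, ← hv']; exact he

theorem sum_flatMap_eq (valid_ops : List String) :
    ∀ (cal : List (Int × List Int)) (t : Int),
      (∀ c ∈ cal, c.2 ≠ []) →
      (cal.flatMap (fun (c : Int × List Int) =>
          if ∃ o ∈ genAux c.2.length c.2 [] [] valid_ops, evalLTR c.2 o = c.1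
          then [c.1] else [])).foldl (· + ·) t
        = cal.foldl
            (fun total c =>
              if PySem.Set.contains
                  ((c.2.drop 1).foldl
                    (fun vals num =>
                      vals.foldl
                        (fun s v => (PySem.Set.ofList valid_ops).foldl
                          (fun s2 op => PySem.Set.add s2 (applyOp v num op)) s)
                        PySem.Set.empty)
                    (PySem.Set.ofList [(PySem.List.pyGet? c.2 0).getD 0])) c.1
              then total + c.1 else total)
            t := by
  intro cal
  induction cal with
  | nil => intro t _; simp
  | cons c rest ih =>
    intro t hpre
    rw [List.flatMap_cons, List.foldl_append, List.foldl_cons]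
    have hiff := calib_iff valid_ops c.1 c.2 (hpre c (by simp))
    by_cases h : ∃ o ∈ genAux c.2.length c.2 [] [] valid_ops, evalLTR c.2 o = c.1
    · rw [if_pos h, if_pos ((PySem.Set.contains_iff _ c.1).2 (hiff.1 h))]
      simpa using ih (t + c.1) (fun d hd => hpre d (by simp [hd]))
    · rw [if_neg h, if_neg (fun hc => h (hiff.2 ((PySem.Set.contains_iff _ c.1).1 hc)))]
      simpa using ih t (fun d hd => hpre d (by simp [hd]))

-- ===== VERDICT (by name: the statement is the Claim_ definition above) =====
theorem get_valid_calibrations_spec : Claim_equal_get_valid_calibrations := by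
  intro calibrations valid_ops _ hpre
  unfold Spec_get_valid_calibrations
  unfold get_valid_calibrations get_valid_calibrations_alt
  simp only []
  rw [PySem.List.foldl_congr_mem calibrations _
    (fun (valid_results : List Int) (c : Int × List Int) =>
      valid_results ++ (if ∃ o ∈ genAux c.2.length c.2 [] [] valid_ops, evalLTR c.2 o = c.1
        then [c.1] else [])) []
    (fun acc c _ => by
      rw [findLoop_eq]
      by_cases h : ∃ o ∈ genAux c.2.length c.2 [] [] valid_ops, evalLTR c.2 o = c.1
      · simp [h]
      · simp [h])]
  rw [PySem.List.foldl_append_eq_flatMap, List.nil_append]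
  exact sum_flatMap_eq valid_ops calibrations 0 (fun c hc => (hpre c hc).1)
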